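-- pv_equiv track=rewrite | github.com/architechlabs/snapcast | rootfs/opt/audio_hub/pulseaudio.py | host_pulse_match_tokens
-- ===== SOURCE A (Python) =====
-- def host_pulse_match_tokens(devices: dict) -> list[str]:
--     tokens = []
--     for capture in devices.get("capture", []):
--         for key in ("card_id", "card_name", "description"):
--             value = str(capture.get(key, "")).lower()
--             for token in value.replace("[", " ").replace("]", " ").replace("_", " ").split():
--                 if len(token) >= 3 and token not in tokens:
--                     tokens.append(token)
--     tokens.extend(["usb", "input", "microphone", "mic"])
--     return tokens
-- ===== SOURCE B (Python) =====
-- def host_pulse_match_tokens(devices: dict) -> list[str]: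
--     # Gather the raw field strings first.
--     fields = []
--     for capture in devices.get("capture", []):
--         for key in ("card_id", "card_name", "description"):
--             fields.append(str(capture.get(key, "")))
--     # Single character-level scan per field: a state machine that lowercases each
--     # char and treats whitespace, '[', ']' and '_' as word separators, emitting
--     # words of length >= 3 directly (no replace/replace/replace/split pipeline).
--     raw = []
--     for text in fields:
--         word = []
--         for c in text:
--             c = c.lower()
--             if c.isspace() or c in "[]_":
--                 if len(word) >= 3:
--                     raw.append("".join(word))
--                 word = []
--             else:
--                 word.append(c)
--         if len(word) >= 3:
--             raw.append("".join(word))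
--     # One order-preserving dedup pass, then the fixed suffix (appended undeduped, as in A).
--     return list(dict.fromkeys(raw)) + ["usb", "input", "microphone", "mic"]
-- ===== Notes on version B (the rewrite author's own statement) =====
-- stated objective: alternative
-- what changed: B replaces A's per-field replace/replace/replace/split string pipeline and inline 'token not in tokens' membership scan by a single character-level state-machine tokenizer (one pass over each field's characters, lowercasing and flushing on whitespace/'['/']'/'_', emitting length>=3 words directly), followed by one separate order-preserving dedup pass over the collected stream.
import Mathlib
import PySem

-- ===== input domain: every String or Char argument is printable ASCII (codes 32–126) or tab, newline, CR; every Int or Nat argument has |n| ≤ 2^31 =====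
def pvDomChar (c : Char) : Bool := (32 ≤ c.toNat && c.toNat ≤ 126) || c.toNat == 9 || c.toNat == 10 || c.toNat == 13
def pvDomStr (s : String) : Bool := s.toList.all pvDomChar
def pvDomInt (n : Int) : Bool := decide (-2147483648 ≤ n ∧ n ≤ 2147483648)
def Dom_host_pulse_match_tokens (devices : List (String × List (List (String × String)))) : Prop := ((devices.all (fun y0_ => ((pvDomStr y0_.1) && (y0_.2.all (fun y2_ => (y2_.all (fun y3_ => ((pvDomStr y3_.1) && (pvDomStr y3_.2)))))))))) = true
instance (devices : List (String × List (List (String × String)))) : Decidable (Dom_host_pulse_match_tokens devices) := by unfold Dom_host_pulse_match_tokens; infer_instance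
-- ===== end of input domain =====

-- B replaces A's replace/replace/replace/split string pipeline and inline 'token not in tokens'
-- membership scan by a single character-level state machine per field (emitting length>=3
-- lowercase words directly) followed by one separate dedup pass.

-- shared helper: dict .get(k, dflt) on an association list (first match); both Pythons call it
def pvGet {α : Type} (d : List (String × α)) (k : String) (dflt : α) : α :=
  match d.find? (fun p => p.1 == k) with
  | some p => p.2
  | none => dflt

-- ===== PORT A =====
-- A's token stream for one field:
-- str(capture.get(key, "")).lower().replace("[", " ").replace("]", " ").replace("_", " ").split()
def pvFieldTokens (capture : List (String × String)) (key : String) : List String :=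
  PySem.Str.split₀
    (PySem.Str.replace
      (PySem.Str.replace
        (PySem.Str.replace (PySem.Str.lower (pvGet capture key "")) "[" " ")
        "]" " ")
      "_" " ")

def host_pulse_match_tokens (devices : List (String × List (List (String × String)))) : List String :=
  let tokens :=
    (pvGet devices "capture" []).foldl (fun tokens capture =>
      ["card_id", "card_name", "description"].foldl (fun tokens key =>
        (pvFieldTokens capture key).foldl (fun tokens token =>
          if 3 ≤ PySem.Str.len token ∧ ¬ tokens.contains token = true then tokens ++ [token]
          else tokens) tokens) tokens) []
  tokens ++ ["usb", "input", "microphone", "mic"]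

-- ===== PORT B =====
-- Source B's inner character loop: state = the current word; lowercase each char, flush at
-- whitespace/'['/']'/'_', emit the word only if its length is >= 3
def pvScanGo (cs : List Char) (word : List Char) : List String :=
  match cs with
  | [] => if 3 ≤ word.length then [String.ofList word] else []
  | c :: rest =>
    let lc := PySem.Chars.lowerChar c
    if PySem.Chars.isspace lc || ['[', ']', '_'].contains lc then
      (if 3 ≤ word.length then [String.ofList word] else []) ++ pvScanGo rest []
    else pvScanGo rest (word ++ [lc])

def host_pulse_match_tokens_alt (devices : List (String × List (List (String × String)))) : List String :=
  let fields :=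
    (pvGet devices "capture" []).foldl (fun fs capture =>
      ["card_id", "card_name", "description"].foldl (fun fs key =>
        fs ++ [pvGet capture key ""]) fs) []
  let raw := fields.foldl (fun raw text => raw ++ pvScanGo text.toList []) []
  PySem.List.dedup raw ++ ["usb", "input", "microphone", "mic"]

-- ===== PRECONDITION & SPEC =====
def Spec_host_pulse_match_tokens (devices : List (String × List (List (String × String)))) (out : List String) : Prop := out = host_pulse_match_tokens_alt devices
instance (devices : List (String × List (List (String × String)))) (out : List String) : Decidable (Spec_host_pulse_match_tokens devices out) := by unfold Spec_host_pulse_match_tokens; infer_instance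

-- ===== CLAIM (what is proved, stated in full; the proofs are below) =====
def Claim_equal_host_pulse_match_tokens : Prop := ∀ (devices : List (String × List (List (String × String)))), Dom_host_pulse_match_tokens devices → Spec_host_pulse_match_tokens devices (host_pulse_match_tokens devices)

-- ===== LEMMAS AND PROOFS =====

-- the character map A's three single-char replaces perform after lowering
def pvH (c : Char) : Char :=
  let lc := PySem.Chars.lowerChar c
  if lc = '[' ∨ lc = ']' ∨ lc = '_' then ' ' else lc

-- A's inner loop (test length, then membership, append if new) is Set.add over the
-- length-filtered token list.
theorem foldl_step_eq_filter_add (ts : List String) (acc : List String) :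
    ts.foldl (fun tokens token =>
        if 3 ≤ PySem.Str.len token ∧ ¬ tokens.contains token = true then tokens ++ [token]
        else tokens) acc
      = (ts.filter (fun token => 3 ≤ PySem.Str.len token)).foldl PySem.Set.add acc := by
  induction ts generalizing acc with
  | nil => rfl
  | cons t ts ih =>
    simp only [List.foldl_cons, List.filter_cons]
    by_cases hl : 3 ≤ PySem.Str.len t
    · by_cases hc : t ∈ acc
      · rw [if_neg (fun h => h.2 (by simpa using hc)), if_pos (by simpa using hl),
          List.foldl_cons]
        have hadd : PySem.Set.add acc t = acc := by
          simp [PySem.Set.add, PySem.Set.contains, hc]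
        rw [hadd]; exact ih acc
      · rw [if_pos ⟨hl, by simpa using hc⟩, if_pos (by simpa using hl), List.foldl_cons]
        have hadd : PySem.Set.add acc t = acc ++ [t] := by
          simp [PySem.Set.add, PySem.Set.contains, hc]
        rw [hadd]; exact ih (acc ++ [t])
    · rw [if_neg (fun h => hl h.1), if_neg (by simpa using hl)]
      exact ih acc

-- folding over a flatMap is the nested fold
theorem foldl_flatMap' {α β γ : Type} (g : α → List β) (f : γ → β → γ)
    (l : List α) (init : γ) :
    (l.flatMap g).foldl f init = l.foldl (fun acc x => (g x).foldl f acc) init := by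
  induction l generalizing init with
  | nil => rfl
  | cons x l ih => simp [List.flatMap_cons, List.foldl_append, ih]

-- replace by a single-char pattern is a character map
theorem replace_go_single (a b : Char) (l : List Char) : ∀ (fuel : Nat) (acc : List Char),
    l.length ≤ fuel →
    PySem.Chars.replace.go [a] [b] fuel l acc
      = acc.reverse ++ l.map (fun c => if c = a then b else c) := by
  induction l with
  | nil =>
    intro fuel acc _
    cases fuel <;> simp [PySem.Chars.replace.go]
  | cons c t ih =>
    intro fuel acc hf
    cases fuel with
    | zero => simp at hf
    | succ n =>
      simp only [PySem.Chars.replace.go]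
      by_cases h : c = a
      · have hp : [a].isPrefixOf (c :: t) = true := by simp [List.isPrefixOf, h]
        rw [if_pos hp]
        have hd : List.drop [a].length (c :: t) = t := by simp
        rw [hd, ih n ([b].reverse ++ acc) (by simp at hf; omega)]
        simp [h]
      · have hp : [a].isPrefixOf (c :: t) = false := by
          simp [List.isPrefixOf]
          exact fun hh => h hh.symm
        rw [if_neg (by simp [hp])]
        rw [ih n (c :: acc) (by simp at hf; omega)]
        simp [h]

theorem replace_single (a b : Char) (l : List Char) :
    PySem.Chars.replace l [a] [b] = l.map (fun c => if c = a then b else c) := by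
  unfold PySem.Chars.replace
  rw [if_neg (by simp)]
  simpa using replace_go_single a b l l.length [] le_rfl

-- the accumulator of split₀.go is a prefix
theorem split₀_go_acc (l : List Char) : ∀ (cur : List Char) (acc : List (List Char)),
    PySem.Chars.split₀.go l cur acc = acc.reverse ++ PySem.Chars.split₀.go l cur [] := by
  induction l with
  | nil =>
    intro cur acc
    by_cases h : cur.isEmpty <;> simp [PySem.Chars.split₀.go, h]
  | cons c rest ih =>
    intro cur acc
    simp only [PySem.Chars.split₀.go]
    by_cases hs : PySem.Chars.isspace c
    · by_cases he : cur.isEmpty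
      · simp only [if_pos hs, if_pos he]
        exact ih [] acc
      · simp only [if_pos hs, if_neg he]
        rw [ih [] (cur.reverse :: acc), ih [] [cur.reverse]]
        simp
    · simp only [if_neg hs]
      exact ih (c :: cur) acc

theorem isspace_pvH (c : Char) :
    PySem.Chars.isspace (pvH c)
      = (PySem.Chars.isspace (PySem.Chars.lowerChar c)
          || ['[', ']', '_'].contains (PySem.Chars.lowerChar c)) := by
  unfold pvH
  by_cases h : PySem.Chars.lowerChar c = '[' ∨ PySem.Chars.lowerChar c = ']' ∨ PySem.Chars.lowerChar c = '_'
  · have hc : (['[', ']', '_'] : List Char).contains (PySem.Chars.lowerChar c) = true := by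
      rcases h with h | h | h <;> simp [h]
    rcases h with h | h | h <;> rw [if_pos (by simp [h])] <;> simp <;> rw [h] <;> decide
  · have hc : (['[', ']', '_'] : List Char).contains (PySem.Chars.lowerChar c) = false := by
      simpa using h
    rw [if_neg h, hc]
    simp

theorem pvH_of_not_sep (c : Char)
    (h : ¬ ['[', ']', '_'].contains (PySem.Chars.lowerChar c) = true) :
    pvH c = PySem.Chars.lowerChar c := by
  unfold pvH
  rw [if_neg]
  intro hc
  apply h
  rcases hc with hc | hc | hc <;> simp [hc]

-- the scanner equals: split the pvH-mapped characters, keep words of length >= 3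
theorem scan_eq (l : List Char) : ∀ (word : List Char),
    pvScanGo l word
      = ((PySem.Chars.split₀.go (l.map pvH) word.reverse []).filter
          (fun w => 3 ≤ w.length)).map String.ofList := by
  induction l with
  | nil =>
    intro word
    simp only [pvScanGo, List.map_nil, PySem.Chars.split₀.go]
    by_cases he : word = []
    · subst he; simp
    · rw [if_neg (show ¬ word.reverse.isEmpty = true by simp [he])]
      by_cases hl : 3 ≤ word.length <;> simp [hl]
  | cons c rest ih =>
    intro word
    simp only [pvScanGo, List.map_cons, PySem.Chars.split₀.go, isspace_pvH]
    by_cases hsep : (PySem.Chars.isspace (PySem.Chars.lowerChar c)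
        || ['[', ']', '_'].contains (PySem.Chars.lowerChar c)) = true
    · rw [if_pos hsep, if_pos hsep]
      by_cases he : word = []
      · subst he
        simp only [List.reverse_nil, List.isEmpty_nil]
        simpa using ih []
      · rw [if_neg (show ¬ word.reverse.isEmpty = true by simp [he])]
        rw [split₀_go_acc (rest.map pvH) [] [word.reverse.reverse]]
        simp only [List.reverse_reverse, List.reverse_cons, List.reverse_nil,
          List.nil_append, List.filter_append, List.map_append]
        have h0 := ih []
        simp only [List.reverse_nil] at h0
        rw [h0]
        by_cases hl : 3 ≤ word.length <;> simp [hl]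
    · rw [if_neg hsep, if_neg hsep]
      have hnb : ¬ ['[', ']', '_'].contains (PySem.Chars.lowerChar c) = true := by
        intro hb; exact hsep (by rw [hb]; simp)
      rw [pvH_of_not_sep c hnb]
      rw [show PySem.Chars.lowerChar c :: word.reverse
            = (word ++ [PySem.Chars.lowerChar c]).reverse by simp]
      exact ih (word ++ [PySem.Chars.lowerChar c])

-- the three-replace pipeline after lowering is the single character map pvH
theorem comp_pvH (c : Char) :
    (if (if (if PySem.Chars.lowerChar c = '[' then ' ' else PySem.Chars.lowerChar c) = ']' then ' '
        else if PySem.Chars.lowerChar c = '[' then ' ' else PySem.Chars.lowerChar c) = '_' then ' '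
      else if (if PySem.Chars.lowerChar c = '[' then ' ' else PySem.Chars.lowerChar c) = ']' then ' '
        else if PySem.Chars.lowerChar c = '[' then ' ' else PySem.Chars.lowerChar c)
    = pvH c := by
  unfold pvH
  by_cases h1 : PySem.Chars.lowerChar c = '['
  · simp [h1]
  · by_cases h2 : PySem.Chars.lowerChar c = ']'
    · simp [h2]
    · by_cases h3 : PySem.Chars.lowerChar c = '_'
      · simp [h3]
      · simp [h1, h2, h3]

-- per field: B's scanner output is A's split tokens filtered by length >= 3
theorem field_eq (capture : List (String × String)) (key : String) :
    pvScanGo (pvGet capture key "").toList []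
      = (pvFieldTokens capture key).filter (fun token => 3 ≤ PySem.Str.len token) := by
  rw [scan_eq]
  unfold pvFieldTokens PySem.Str.split₀ PySem.Str.replace PySem.Str.lower
  simp only [String.toList_ofList]
  rw [show ("[" : String).toList = ['['] from by decide,
      show ("]" : String).toList = [']'] from by decide,
      show ("_" : String).toList = ['_'] from by decide,
      show (" " : String).toList = [' '] from by decide]
  rw [replace_single, replace_single, replace_single]
  unfold PySem.Chars.lower
  simp only [List.map_map, List.reverse_nil]
  rw [show ((fun c => if c = '_' then ' ' else c) ∘ (fun c => if c = ']' then ' ' else c)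
        ∘ (fun c => if c = '[' then ' ' else c) ∘ PySem.Chars.lowerChar) = pvH from
      funext (fun c => comp_pvH c)]
  unfold PySem.Chars.split₀
  rw [List.filter_map]
  congr 1
  apply List.filter_congr
  intro w _
  simp [PySem.Str.len]

-- ===== VERDICT (by name: the statement is the Claim_ definition above) =====
theorem host_pulse_match_tokens_spec : Claim_equal_host_pulse_match_tokens := by
  intro devices _
  unfold Spec_host_pulse_match_tokens host_pulse_match_tokens host_pulse_match_tokens_alt
  simp only [PySem.List.foldl_append_singleton_eq_map, PySem.List.foldl_append_eq_flatMap,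
    List.nil_append, List.flatMap_map, field_eq, PySem.List.dedup, PySem.Set.ofList,
    PySem.Set.empty, foldl_flatMap', foldl_step_eq_filter_add]
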